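-- pv_equiv track=rewrite | github.com/nmanikanta23/flaskdeploy | smart tarvel/app.py | parse_restaurant_results
-- ===== SOURCE A (Python) =====
-- def parse_restaurant_results(response):
--     # Initialize variables
--     restaurants = []
--     current_restaurant = {}
--
--     # Split the response into lines
--     lines = response.split('\n')
--
--     for line in lines:
--         line = line.strip()  # Remove leading/trailing whitespace
--         if line.startswith("Restaurant:"):
--             # If we already have a restaurant, add it to the list
--             if current_restaurant:
--                 restaurants.append(current_restaurant)
--                 current_restaurant = {}
--             current_restaurant['name'] = line.split("Restaurant:")[1].strip()
--         elif line.startswith("Location:"):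
--             current_restaurant['location'] = line.split("Location:")[1].strip()
--         elif line.startswith("Cost:"):
--             current_restaurant['cost'] = line.split("Cost:")[1].strip()
--
--     # Add the last restaurant if it exists
--     if current_restaurant:
--         restaurants.append(current_restaurant)
--
--     return restaurants
-- ===== SOURCE B (Python) =====
-- def parse_restaurant_results(response):
--     # Phase 1: strip lines and partition them into groups, one per "Restaurant:" marker,
--     # plus a leading group for Location:/Cost: lines seen before any marker.
--     lines = [ln.strip() for ln in response.split('\n')]
--     done, cur = [], []
--     for ln in lines:
--         if ln.startswith("Restaurant:"):
--             done.append(cur)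
--             cur = [ln]
--         elif ln.startswith("Location:") or ln.startswith("Cost:"):
--             cur.append(ln)
--     groups = done + [cur]
--     # Phase 2: build one dict per group; skip groups that yield an empty dict.
--     out = []
--     for g in groups:
--         d = {}
--         for ln in g:
--             if ln.startswith("Restaurant:"):
--                 d['name'] = ln.split("Restaurant:")[1].strip()
--             elif ln.startswith("Location:"):
--                 d['location'] = ln.split("Location:")[1].strip()
--             else:
--                 d['cost'] = ln.split("Cost:")[1].strip()
--         if d:
--             out.append(d)
--     return out
-- ===== Notes on version B (the rewrite author's own statement) =====
-- stated objective: alternative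
-- what changed: Replaced A's single loop that threads a mutable current-restaurant dict through the line scan with a two-phase decomposition: first partition the stripped lines into per-restaurant groups (new group at each 'Restaurant:' marker, plus a leading group), then build one dict per group and drop groups yielding an empty dict.
import Mathlib
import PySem

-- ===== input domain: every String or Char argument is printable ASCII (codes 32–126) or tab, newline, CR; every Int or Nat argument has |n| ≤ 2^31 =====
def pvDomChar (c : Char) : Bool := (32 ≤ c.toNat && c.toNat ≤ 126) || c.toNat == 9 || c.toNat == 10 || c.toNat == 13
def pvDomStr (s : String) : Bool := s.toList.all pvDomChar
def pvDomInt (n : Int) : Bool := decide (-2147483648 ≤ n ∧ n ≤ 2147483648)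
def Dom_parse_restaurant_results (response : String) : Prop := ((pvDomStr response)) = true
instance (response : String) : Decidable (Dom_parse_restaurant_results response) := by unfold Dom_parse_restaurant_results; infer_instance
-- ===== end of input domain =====

-- B replaces A's single scan threading a mutable current-restaurant dict by a two-phase
-- decomposition (partition lines into per-restaurant groups, then build one dict per group);
-- same cost, alternative structure. Equivalence of the return values is proved below.

-- ===== PORT A =====
-- value after "prefix": line.split(prefix)[1].strip(); the pyGetD default "" is never used on
-- the reachable calls (the line starts with the prefix, so the split has at least two pieces)
def pvVal (line pref : String) : String :=
  PySem.Str.strip (PySem.List.pyGetD ((PySem.Str.split? line pref).getD []) 1 "")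

-- one iteration of A's loop; state = (restaurants, current_restaurant)
def aStep (st : List (PySem.Dict String String) × PySem.Dict String String) (rawline : String) :
    List (PySem.Dict String String) × PySem.Dict String String :=
  let line := PySem.Str.strip rawline
  if PySem.Str.startswith line "Restaurant:" then
    ((if st.2.items.isEmpty then st.1 else st.1 ++ [st.2]),
     PySem.Dict.insert PySem.Dict.empty "name" (pvVal line "Restaurant:"))
  else if PySem.Str.startswith line "Location:" then
    (st.1, st.2.insert "location" (pvVal line "Location:"))
  else if PySem.Str.startswith line "Cost:" then
    (st.1, st.2.insert "cost" (pvVal line "Cost:"))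
  else st

-- trailing "add the last restaurant if it exists" + return (dicts as item lists)
def aFinish (st : List (PySem.Dict String String) × PySem.Dict String String) :
    List (List (String × String)) :=
  (if st.2.items.isEmpty then st.1 else st.1 ++ [st.2]).map (fun d => d.items)

def parse_restaurant_results (response : String) : List (List (String × String)) :=
  aFinish (((PySem.Str.split? response "\n").getD []).foldl aStep ([], PySem.Dict.empty))

-- ===== PORT B =====
-- phase 1 step: state = (done groups, current group)
def bGroupStep (st : List (List String) × List String) (ln : String) :
    List (List String) × List String :=
  if PySem.Str.startswith ln "Restaurant:" then (st.1 ++ [st.2], [ln])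
  else if PySem.Str.startswith ln "Location:" || PySem.Str.startswith ln "Cost:" then
    (st.1, st.2 ++ [ln])
  else st

-- phase 2: build the dict of one group
def bBuildStep (d : PySem.Dict String String) (ln : String) : PySem.Dict String String :=
  if PySem.Str.startswith ln "Restaurant:" then d.insert "name" (pvVal ln "Restaurant:")
  else if PySem.Str.startswith ln "Location:" then d.insert "location" (pvVal ln "Location:")
  else d.insert "cost" (pvVal ln "Cost:")

def bBuild (g : List String) : PySem.Dict String String :=
  g.foldl bBuildStep PySem.Dict.empty

def parse_restaurant_results_alt (response : String) : List (List (String × String)) :=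
  let lines := ((PySem.Str.split? response "\n").getD []).map PySem.Str.strip
  let st := lines.foldl bGroupStep ([], [])
  let groups := st.1 ++ [st.2]
  groups.foldl (fun acc g =>
    let d := bBuild g
    if d.items.isEmpty then acc else acc ++ [d.items]) []

-- ===== PRECONDITION & SPEC =====
def Spec_parse_restaurant_results (response : String) (out : List (List (String × String))) : Prop := out = parse_restaurant_results_alt response
instance (response : String) (out : List (List (String × String))) : Decidable (Spec_parse_restaurant_results response out) := by unfold Spec_parse_restaurant_results; infer_instance

-- ===== CLAIM (what is proved, stated in full; the proofs are below) =====
def Claim_equal_parse_restaurant_results : Prop := ∀ (response : String), Dom_parse_restaurant_results response → Spec_parse_restaurant_results response (parse_restaurant_results response)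

-- ===== LEMMAS AND PROOFS =====

-- flush a dict: the list A appends for it (nothing if empty)
def pvFlush (c : PySem.Dict String String) : List (List (String × String)) :=
  if c.items.isEmpty then [] else [c.items]

-- canonical recursive meaning of the remaining (already stripped) lines given current dict c
def pvSpecRec (c : PySem.Dict String String) : List String → List (List (String × String))
  | [] => pvFlush c
  | l :: ls =>
    if PySem.Str.startswith l "Restaurant:" then
      pvFlush c ++ pvSpecRec (PySem.Dict.insert PySem.Dict.empty "name" (pvVal l "Restaurant:")) ls
    else if PySem.Str.startswith l "Location:" then
      pvSpecRec (c.insert "location" (pvVal l "Location:")) ls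
    else if PySem.Str.startswith l "Cost:" then
      pvSpecRec (c.insert "cost" (pvVal l "Cost:")) ls
    else pvSpecRec c ls

lemma aLoop_eq (ls : List String) : ∀ (rs : List (PySem.Dict String String)) c,
    aFinish (ls.foldl aStep (rs, c))
      = rs.map (fun d => d.items) ++ pvSpecRec c (ls.map PySem.Str.strip) := by
  induction ls with
  | nil =>
      intro rs c
      simp only [List.foldl_nil, List.map_nil, aFinish, pvSpecRec, pvFlush]
      split_ifs <;> simp
  | cons l ls ih =>
      intro rs c
      simp only [List.foldl_cons, List.map_cons, aStep, pvSpecRec]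
      split_ifs with hR h hL hC <;>
        first
          | (rw [ih]; simp [pvFlush, *])
          | simp_all

lemma bOut_eq (gs : List (List String)) : ∀ (acc : List (List (String × String))),
    gs.foldl (fun acc g => let d := bBuild g; if d.items.isEmpty then acc else acc ++ [d.items]) acc
      = acc ++ gs.flatMap (fun g => pvFlush (bBuild g)) := by
  induction gs with
  | nil => intro acc; simp
  | cons g gs ih =>
      intro acc
      simp only [List.foldl_cons, List.flatMap_cons, ih, pvFlush]
      split_ifs <;> simp

lemma bBuild_append (cur : List String) (l : String) :
    bBuild (cur ++ [l]) = bBuildStep (bBuild cur) l := by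
  simp [bBuild, List.foldl_append]

lemma bBuildStep_R (d : PySem.Dict String String) (l : String)
    (hR : PySem.Str.startswith l "Restaurant:" = true) :
    bBuildStep d l = d.insert "name" (pvVal l "Restaurant:") := by
  unfold bBuildStep; rw [hR]; simp

lemma bBuildStep_L (d : PySem.Dict String String) (l : String)
    (hR : ¬ PySem.Str.startswith l "Restaurant:" = true)
    (hL : PySem.Str.startswith l "Location:" = true) :
    bBuildStep d l = d.insert "location" (pvVal l "Location:") := by
  rw [Bool.not_eq_true] at hR
  unfold bBuildStep; rw [hR, hL]; simp

lemma bBuildStep_C (d : PySem.Dict String String) (l : String)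
    (hR : ¬ PySem.Str.startswith l "Restaurant:" = true)
    (hL : ¬ PySem.Str.startswith l "Location:" = true) :
    bBuildStep d l = d.insert "cost" (pvVal l "Cost:") := by
  rw [Bool.not_eq_true] at hR hL
  unfold bBuildStep; rw [hR, hL]; simp

lemma bGroups_eq (ls : List String) : ∀ (done : List (List String)) (cur : List String),
    ((ls.foldl bGroupStep (done, cur)).1 ++ [(ls.foldl bGroupStep (done, cur)).2]).flatMap
        (fun g => pvFlush (bBuild g))
      = done.flatMap (fun g => pvFlush (bBuild g)) ++ pvSpecRec (bBuild cur) ls := by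
  induction ls with
  | nil => intro done cur; simp [pvSpecRec]
  | cons l ls ih =>
      intro done cur
      simp only [List.foldl_cons, bGroupStep, pvSpecRec]
      split_ifs with hR hLC hL hC hL' hC'
      · rw [ih]
        have hb : bBuild [l] = PySem.Dict.empty.insert "name" (pvVal l "Restaurant:") := by
          show bBuildStep PySem.Dict.empty l = _
          exact bBuildStep_R _ _ hR
        rw [hb]
        simp
      · rw [ih, bBuild_append, bBuildStep_L _ _ hR hL]
      · rw [ih, bBuild_append, bBuildStep_C _ _ hR hL]
      · simp_all
      · simp_all
      · simp_all
      · rw [ih]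

-- ===== VERDICT (by name: the statement is the Claim_ definition above) =====
theorem parse_restaurant_results_spec : Claim_equal_parse_restaurant_results := by
  intro response _
  unfold Spec_parse_restaurant_results parse_restaurant_results parse_restaurant_results_alt
  rw [aLoop_eq, bOut_eq, bGroups_eq]
  simp [bBuild]
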